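-- pv_equiv track=rewrite | github.com/JoroKirilov/Phyton- | Homeworks/mentor_meet_15.01/sunset2.py | who_see_sunset
-- ===== SOURCE A (Python) =====
-- def who_see_sunset(arr: list):
--     tmp_list = []
--     left = 0
--     for n in arr:
--         if n > left:
--             left = n
--             tmp_list.append(n)
--     return tmp_list
-- ===== SOURCE B (Python) =====
-- def who_see_sunset(arr: list):
--     # divide and conquer: solve(seg, bound) returns (the elements of seg strictly
--     # greater than everything before them (incl. bound), max(bound, *seg));
--     # recursion depth is O(log n)
--     def solve(seg, bound):
--         if not seg:
--             return [], bound
--         if len(seg) == 1: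
--             n = seg[0]
--             return ([n] if n > bound else []), max(bound, n)
--         mid = len(seg) // 2
--         left_vis, m1 = solve(seg[:mid], bound)
--         right_vis, m2 = solve(seg[mid:], m1)
--         return left_vis + right_vis, m2
--     return solve(arr, 0)[0]
-- ===== Notes on version B (the rewrite author's own statement) =====
-- stated objective: alternative
-- what changed: Replaced the single left-to-right running-max accumulator loop by a divide-and-conquer recursion that splits the list in halves, solves each half against an incoming bound and returns the half's visible elements together with the new maximum, concatenating the two results.
import Mathlib
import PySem

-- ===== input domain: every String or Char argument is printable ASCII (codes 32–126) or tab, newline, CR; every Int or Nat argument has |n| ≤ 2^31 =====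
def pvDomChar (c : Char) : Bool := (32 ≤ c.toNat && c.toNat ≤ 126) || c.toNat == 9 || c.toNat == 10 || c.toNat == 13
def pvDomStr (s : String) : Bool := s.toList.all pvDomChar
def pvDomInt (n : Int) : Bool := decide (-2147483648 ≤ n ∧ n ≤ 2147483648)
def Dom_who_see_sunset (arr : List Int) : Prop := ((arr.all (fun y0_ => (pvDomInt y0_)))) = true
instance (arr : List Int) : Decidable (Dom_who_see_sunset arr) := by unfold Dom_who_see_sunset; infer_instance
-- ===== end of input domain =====

-- B replaces A's single running-max loop by a divide-and-conquer recursion on list halves; alternative decomposition, similar cost.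


-- ===== PORT A =====
-- for n in arr: if n > left: left = n; tmp_list.append(n)
def who_see_sunset (arr : List Int) : List Int :=
  (arr.foldl (fun (st : List Int × Int) n =>
      if n > st.2 then (st.1 ++ [n], n) else st) ([], 0)).1

-- ===== PORT B =====
-- solve(seg, bound): divide and conquer on halves, returning (visible, new max)
def pvSolve (seg : List Int) (bound : Int) : List Int × Int :=
  match seg with
  | [] => ([], bound)
  | [n] => ((if n > bound then [n] else []), max bound n)
  | x :: y :: rest =>
      let seg := x :: y :: rest
      let mid := seg.length / 2
      let l := pvSolve (seg.take mid) bound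
      let r := pvSolve (seg.drop mid) l.2
      (l.1 ++ r.1, r.2)
  termination_by seg.length
  decreasing_by
    · simp [List.length_take]; omega
    · simp [List.length_drop]; omega

def who_see_sunset_alt (arr : List Int) : List Int :=
  (pvSolve arr 0).1

-- ===== PRECONDITION & SPEC =====
def Spec_who_see_sunset (arr : List Int) (out : List Int) : Prop := out = who_see_sunset_alt arr
instance (arr : List Int) (out : List Int) : Decidable (Spec_who_see_sunset arr out) := by unfold Spec_who_see_sunset; infer_instance

-- ===== CLAIM (what is proved, stated in full; the proofs are below) =====
def Claim_equal_who_see_sunset : Prop := ∀ (arr : List Int), Dom_who_see_sunset arr → Spec_who_see_sunset arr (who_see_sunset arr)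

-- ===== LEMMAS AND PROOFS =====

-- recursive characterisation of A's loop result from a given running max
def pvRun (left : Int) : List Int → List Int
  | [] => []
  | n :: t => if n > left then n :: pvRun n t else pvRun left t

theorem pvA_foldl (arr : List Int) : ∀ (tmp : List Int) (left : Int),
    (arr.foldl (fun (st : List Int × Int) n =>
      if n > st.2 then (st.1 ++ [n], n) else st) (tmp, left)).1 = tmp ++ pvRun left arr := by
  induction arr with
  | nil => intro tmp left; simp [pvRun]
  | cons n t ih =>
    intro tmp left
    simp only [List.foldl_cons, pvRun]
    by_cases h : n > left
    · simp [h, ih]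
    · simp [h, ih]

theorem pvRun_append (xs : List Int) : ∀ (ys : List Int) (b : Int),
    pvRun b (xs ++ ys) = pvRun b xs ++ pvRun (xs.foldl max b) ys := by
  induction xs with
  | nil => intro ys b; simp [pvRun]
  | cons n t ih =>
    intro ys b
    simp only [List.cons_append, pvRun, List.foldl_cons]
    by_cases h : n > b
    · have : max b n = n := by omega
      simp [h, this, ih]
    · have : max b n = b := by omega
      simp [h, this, ih]

theorem pvSolve_eq_aux (n : Nat) : ∀ (seg : List Int), seg.length ≤ n → ∀ (bound : Int),
    pvSolve seg bound = (pvRun bound seg, seg.foldl max bound) := by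
  induction n with
  | zero =>
    intro seg hlen bound
    have h0 : seg = [] := List.eq_nil_of_length_eq_zero (Nat.le_zero.mp hlen)
    subst h0; simp [pvSolve, pvRun]
  | succ n ih =>
    intro seg hlen bound
    match seg with
    | [] => simp [pvSolve, pvRun]
    | [m] => simp only [pvSolve, pvRun, List.foldl_cons, List.foldl_nil]
    | x :: y :: rest =>
      rw [pvSolve]
      have hlen' : (x :: y :: rest).length ≤ n + 1 := hlen
      have hlen2 : (x :: y :: rest).length = rest.length + 2 := by simp
      have h1 : ((x :: y :: rest).take ((x :: y :: rest).length / 2)).length ≤ n := by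
        simp only [List.length_take]; omega
      have h2 : ((x :: y :: rest).drop ((x :: y :: rest).length / 2)).length ≤ n := by
        simp only [List.length_drop]; omega
      rw [ih _ h1 bound, ih _ h2]
      simp only
      conv_rhs => rw [← List.take_append_drop ((x :: y :: rest).length / 2) (x :: y :: rest)]
      rw [pvRun_append, List.foldl_append]

theorem pvSolve_eq (seg : List Int) (bound : Int) :
    pvSolve seg bound = (pvRun bound seg, seg.foldl max bound) :=
  pvSolve_eq_aux seg.length seg (le_refl _) bound

-- ===== VERDICT (by name: the statement is the Claim_ definition above) =====
theorem who_see_sunset_spec : Claim_equal_who_see_sunset := by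
  intro arr _
  show who_see_sunset arr = who_see_sunset_alt arr
  rw [who_see_sunset, who_see_sunset_alt, pvA_foldl, pvSolve_eq]
  simp
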